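-- pv_equiv track=rewrite | github.com/prashanth685/new_desktop_python | features/bode_plot.py | find_trigger_indices
-- ===== SOURCE A (Python) =====
-- def find_trigger_indices(trigger_data):
--     """Find indices where trigger_data == 1 with minimum distance between triggers."""
--     indices = []
--     min_distance = 5
--     for i in range(len(trigger_data)):
--         if trigger_data[i] == 1:
--             if not indices or i - indices[-1] >= min_distance:
--                 indices.append(i)
--     return indices
-- ===== SOURCE B (Python) =====
-- def find_trigger_indices(trigger_data):
--     """Find indices where trigger_data == 1 with minimum distance between triggers."""
--     cands = [i for i, v in enumerate(trigger_data) if v == 1]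
--     result = []
--     while cands:
--         head = cands[0]
--         result.append(head)
--         cands = [c for c in cands if c - head >= 5]
--     return result
-- ===== Notes on version B (the rewrite author's own statement) =====
-- stated objective: alternative
-- what changed: Replaces A's single indexed greedy scan, which checks each element against the last appended output index, with a pick-and-prune loop: collect all 1-indices once, then repeatedly take the first remaining candidate and rebuild the candidate pool by filtering out everything closer than 5; there is no per-element spacing check against the output list.
import Mathlib
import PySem

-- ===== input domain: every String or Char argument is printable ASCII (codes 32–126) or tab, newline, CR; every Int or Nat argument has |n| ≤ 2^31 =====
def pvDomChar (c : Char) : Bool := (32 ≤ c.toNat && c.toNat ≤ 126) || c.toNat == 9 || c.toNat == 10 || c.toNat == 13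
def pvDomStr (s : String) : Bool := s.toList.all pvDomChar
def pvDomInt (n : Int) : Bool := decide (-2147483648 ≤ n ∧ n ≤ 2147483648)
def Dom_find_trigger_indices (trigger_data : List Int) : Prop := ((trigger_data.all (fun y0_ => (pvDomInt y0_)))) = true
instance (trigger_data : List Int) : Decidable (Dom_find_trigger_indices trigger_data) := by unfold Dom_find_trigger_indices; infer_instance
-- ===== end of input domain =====

-- B replaces A's greedy scan (each element checked against the last appended output index) by a
-- pick-and-prune loop over the list of candidate indices; same return value, no speed claim.

-- ===== PORT A =====
-- single loop over range(len(trigger_data)); guard re-reads the last element of the output list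
def find_trigger_indices (trigger_data : List Int) : List Int :=
  (PySem.List.pyRange 0 (PySem.List.len trigger_data) 1).foldl
    (fun indices i =>
      if PySem.List.pyGetD trigger_data i 0 = 1 then
        if indices = [] ∨ 5 ≤ i - PySem.List.pyGetD indices (-1) 0 then
          indices ++ [i]
        else indices
      else indices) []

-- ===== PORT B =====
-- while cands:  head = cands[0]; result.append(head); cands = [c for c in cands if c - head >= 5]
def pvPickLoop (result : List Int) (cands : List Int) : List Int :=
  match cands with
  | [] => result
  | head :: t =>
      pvPickLoop (result ++ [head]) ((head :: t).filter (fun c => decide (5 ≤ c - head)))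
termination_by cands.length
decreasing_by
  simp only [List.filter_cons]
  have h : ¬ (5 ≤ head - head) := by omega
  simp only [h, decide_false, if_false, cond_false]
  exact Nat.lt_succ_of_le (List.length_filter_le _ _)

-- cands = [i for i, v in enumerate(trigger_data) if v == 1]
def find_trigger_indices_alt (trigger_data : List Int) : List Int :=
  let cands : List Int :=
    (PySem.List.enumerate trigger_data 0).filterMap
      (fun p => if p.2 = 1 then some p.1 else none)
  pvPickLoop [] cands

-- ===== PRECONDITION & SPEC =====
def Spec_find_trigger_indices (trigger_data : List Int) (out : List Int) : Prop := out = find_trigger_indices_alt trigger_data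
instance (trigger_data : List Int) (out : List Int) : Decidable (Spec_find_trigger_indices trigger_data out) := by unfold Spec_find_trigger_indices; infer_instance

-- ===== CLAIM (what is proved, stated in full; the proofs are below) =====
def Claim_equal_find_trigger_indices : Prop := ∀ (trigger_data : List Int), Dom_find_trigger_indices trigger_data → Spec_find_trigger_indices trigger_data (find_trigger_indices trigger_data)

-- ===== LEMMAS AND PROOFS =====

-- the A-side loop body, on (index, value) pairs
def pvStepA (indices : List Int) (p : Int × Int) : List Int :=
  if p.2 = 1 then
    if indices = [] ∨ 5 ≤ p.1 - PySem.List.pyGetD indices (-1) 0 then indices ++ [p.1]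
    else indices
  else indices

-- reference greedy on the candidate list, carrying the last picked index
def pvGreedy : Option Int → List Int → List Int
  | _, [] => []
  | none, c :: t => c :: pvGreedy (some c) t
  | some a, c :: t => if 5 ≤ c - a then c :: pvGreedy (some c) t else pvGreedy (some a) t

lemma pv_a_foldl (trigger_data : List Int) :
    find_trigger_indices trigger_data
      = (PySem.List.enumerate trigger_data 0).foldl pvStepA [] := by
  unfold find_trigger_indices
  rw [PySem.List.enumerate_eq_map_pyRange trigger_data 0, List.foldl_map]
  rfl

-- A's fold equals the greedy over the filtered candidates, given the `last` invariant
lemma pv_a_greedy (l : List (Int × Int)) (res : List Int) (last : Option Int)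
    (h : (last = none → res = []) ∧ ∀ a, last = some a → res ≠ [] ∧ PySem.List.pyGetD res (-1) 0 = a) :
    l.foldl pvStepA res
      = res ++ pvGreedy last (l.filterMap (fun p => if p.2 = 1 then some p.1 else none)) := by
  induction l generalizing res last with
  | nil => simp [pvGreedy]
  | cons p t ih =>
    simp only [List.foldl_cons, List.filterMap_cons]
    by_cases hp : p.2 = 1
    · cases last with
      | none =>
        have hres : res = [] := h.1 rfl
        subst hres
        simp only [pvStepA, hp, if_pos, pvGreedy, if_true, eq_self_iff_true, true_or, if_pos,
          List.nil_append]
        rw [ih [p.1] (some p.1) (by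
          refine ⟨by simp, ?_⟩
          intro a ha
          simp only [Option.some.injEq] at ha
          subst ha
          exact ⟨by simp, PySem.List.pyGetD_neg_one_append_singleton [] p.1 0⟩)]
        simp [pvGreedy]
      | some a =>
        obtain ⟨hne, hlast⟩ := h.2 a rfl
        by_cases hd : 5 ≤ p.1 - a
        · simp only [pvStepA, hp, if_true, hlast, hne, false_or, hd, if_pos, pvGreedy]
          rw [ih (res ++ [p.1]) (some p.1) (by
            refine ⟨by simp, ?_⟩
            intro b hb
            simp only [Option.some.injEq] at hb
            subst hb
            exact ⟨by simp, PySem.List.pyGetD_neg_one_append_singleton res p.1 0⟩)]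
          simp [pvGreedy]
        · have : ¬ (res = [] ∨ 5 ≤ p.1 - PySem.List.pyGetD res (-1) 0) := by
            rw [hlast]; tauto
          simp only [pvStepA, hp, if_true, this, if_false, pvGreedy, hd]
          exact ih res (some a) h
    · simp only [pvStepA, hp, if_false, pvGreedy]
      exact ih res last h

-- after a pick at a, the greedy continuation only sees candidates at distance ≥ 5
lemma pv_greedy_filter : ∀ (n : Nat) (l : List Int), l.length ≤ n → ∀ (a : Int),
    pvGreedy (some a) l = pvGreedy none (l.filter (fun c => decide (5 ≤ c - a))) := by
  intro n
  induction n with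
  | zero =>
    intro l hl a
    have : l = [] := List.eq_nil_of_length_eq_zero (Nat.le_zero.mp hl)
    subst this
    rfl
  | succ n ih =>
    intro l hl a
    cases l with
    | nil => rfl
    | cons c t =>
      have hl' : t.length ≤ n := Nat.succ_le_succ_iff.mp hl
      by_cases hd : 5 ≤ c - a
      · have hff : ∀ (u : List Int),
            List.filter (fun x => decide (5 ≤ x - c)) (List.filter (fun x => decide (5 ≤ x - a)) u)
              = List.filter (fun x => decide (5 ≤ x - c)) u := by
          intro u
          induction u with
          | nil => rfl
          | cons x xs ihx =>
            by_cases h2 : (5:Int) ≤ x - c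
            · have h1 : (5:Int) ≤ x - a := by omega
              simp [List.filter_cons, h1, h2, ihx]
            · by_cases h1 : (5:Int) ≤ x - a
              · simp [List.filter_cons, h1, h2, ihx]
              · simp [List.filter_cons, h1, h2, ihx]
        have hflen : (t.filter (fun x => decide (5 ≤ x - a))).length ≤ n :=
          le_trans (List.length_filter_le _ _) hl'
        simp only [pvGreedy, hd, if_pos, List.filter_cons, decide_eq_true hd, cond_true]
        simp only [decide_true, if_pos, pvGreedy]
        rw [ih t hl' c, ih _ hflen c, hff t]
      · have hdc : ¬ (decide (5 ≤ c - a) = true) := by simpa using hd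
        simp only [Bool.not_eq_true] at hdc
        simp only [pvGreedy, hd, if_false, List.filter_cons, hdc]
        exact ih t hl' a

lemma pv_pick_greedy : ∀ (n : Nat) (l : List Int), l.length ≤ n → ∀ (res : List Int),
    pvPickLoop res l = res ++ pvGreedy none l := by
  intro n
  induction n with
  | zero =>
    intro l hl res
    have : l = [] := List.eq_nil_of_length_eq_zero (Nat.le_zero.mp hl)
    subst this
    simp [pvPickLoop, pvGreedy]
  | succ n ih =>
    intro l hl res
    cases l with
    | nil => simp [pvPickLoop, pvGreedy]
    | cons c t =>
      rw [pvPickLoop]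
      have hc : ¬ (5 ≤ c - c) := by omega
      have hfc : (c :: t).filter (fun x => decide (5 ≤ x - c)) = t.filter (fun x => decide (5 ≤ x - c)) := by
        simp [List.filter_cons, hc]
      rw [hfc, ih _ (le_trans (List.length_filter_le _ _) (Nat.succ_le_succ_iff.mp hl))]
      simp only [pvGreedy, List.append_assoc, List.singleton_append]
      rw [pv_greedy_filter _ _ (le_refl _)]

-- ===== VERDICT (by name: the statement is the Claim_ definition above) =====
theorem find_trigger_indices_spec : Claim_equal_find_trigger_indices := by
  intro trigger_data _
  unfold Spec_find_trigger_indices find_trigger_indices_alt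
  rw [pv_a_foldl, pv_a_greedy _ [] none ⟨fun _ => rfl, by simp⟩,
    pv_pick_greedy ((PySem.List.enumerate trigger_data 0).filterMap
      (fun p => if p.2 = 1 then some p.1 else none)).length _ le_rfl]
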